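-- pv_equiv track=rewrite | github.com/JunseokLee3/self_study | coding test/3회독/연습문제/114 copy.py | solution
-- ===== SOURCE A (Python) =====
-- def solution(code):
--     ret = ""
--     mode = 0
--
--     for idx, char in enumerate(code):
--         if char == "1":
--             mode = 1 - mode
--         else:
--             if mode == 0 and idx % 2 == 0:
--                 ret += char
--             elif mode == 1 and idx % 2 != 0:
--                 ret += char
--
--     for idx, char in enumerate(code):
--         if char == "1":
--             mode = 1 - mode
--         else:
--             if mode == 0 and idx % 2 == 0:
--                 ret += char
--             elif mode == 1 and idx % 2 != 0:
--                 ret += char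
--
--     return ret if ret else "EMPTY"
-- ===== SOURCE B (Python) =====
-- def solution(code):
--     ones = sum(ch == "1" for ch in code)
--     pre = 0
--     part1 = []
--     part2 = []
--     for idx, char in enumerate(code):
--         if char == "1":
--             pre += 1
--         else:
--             p = (pre + idx) % 2
--             if p == 0:
--                 part1.append(char)
--             if (p + ones) % 2 == 0:
--                 part2.append(char)
--     ret = "".join(part1) + "".join(part2)
--     return ret if ret else "EMPTY"
-- ===== Notes on version B (the rewrite author's own statement) =====
-- stated objective: alternative
-- what changed: Instead of A's two stateful passes flipping a mode flag, B counts the '1's once and makes a single pass that builds both output segments simultaneously from the closed-form parity condition (prefix-'1'-count + index) % 2, using the total count for the second segment's parity offset.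
import Mathlib
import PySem

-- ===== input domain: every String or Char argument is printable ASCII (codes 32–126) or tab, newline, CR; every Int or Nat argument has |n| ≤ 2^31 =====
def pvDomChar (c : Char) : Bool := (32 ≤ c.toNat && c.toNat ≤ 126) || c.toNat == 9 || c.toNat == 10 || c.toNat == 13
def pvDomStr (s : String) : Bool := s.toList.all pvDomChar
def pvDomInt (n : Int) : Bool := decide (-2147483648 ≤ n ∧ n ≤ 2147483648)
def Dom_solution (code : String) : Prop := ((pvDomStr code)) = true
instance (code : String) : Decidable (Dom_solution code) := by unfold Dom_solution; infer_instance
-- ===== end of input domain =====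

-- B replaces A's two stateful mode-flipping passes by one pass that counts the '1's first and
-- builds both output segments at once from the parity condition (prefix-count + idx) % 2 (objective: alternative).

-- ===== PORT A =====
-- A's loop body over state (ret, mode), branch order exactly as in the Python (both loops share this body text).
def solutionStep (st : List Char × Int) (p : Int × Char) : List Char × Int :=
  if p.2 = '1' then (st.1, 1 - st.2)
  else if st.2 = 0 ∧ p.1 % 2 = 0 then (st.1 ++ [p.2], st.2)
  else if st.2 = 1 ∧ p.1 % 2 ≠ 0 then (st.1 ++ [p.2], st.2)
  else st

def solution (code : String) : String :=
  let st1 := (PySem.List.enumerate code.toList).foldl solutionStep ([], 0)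
  let st2 := (PySem.List.enumerate code.toList).foldl solutionStep st1
  if st2.1 = [] then "EMPTY" else String.ofList st2.1

-- ===== PORT B =====
-- B's single loop body over state (pre, part1, part2); `ones` is the total '1'-count.
def solutionBStep (ones : Int) (st : Int × List Char × List Char) (p : Int × Char) :
    Int × List Char × List Char :=
  if p.2 = '1' then (st.1 + 1, st.2.1, st.2.2)
  else
    let q := (st.1 + p.1) % 2
    (st.1,
     (if q = 0 then st.2.1 ++ [p.2] else st.2.1),
     (if (q + ones) % 2 = 0 then st.2.2 ++ [p.2] else st.2.2))

def solution_alt (code : String) : String :=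
  let ones : Int := code.toList.foldl (fun acc ch => if ch == '1' then acc + 1 else acc) 0
  let st := (PySem.List.enumerate code.toList).foldl (solutionBStep ones) (0, [], [])
  let ret := st.2.1 ++ st.2.2
  if ret = [] then "EMPTY" else String.ofList ret

-- ===== PRECONDITION & SPEC =====
def Spec_solution (code : String) (out : String) : Prop := out = solution_alt code
instance (code : String) (out : String) : Decidable (Spec_solution code out) := by unfold Spec_solution; infer_instance

-- ===== CLAIM (what is proved, stated in full; the proofs are below) =====
def Claim_equal_solution : Prop := ∀ (code : String), Dom_solution code → Spec_solution code (solution code)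

-- ===== LEMMAS AND PROOFS =====

/-- Proof-side reference: one selection pass with a running mode flag (kept chars, final mode). -/
def solutionPass : List (Int × Char) → Int → List Char × Int
  | [], mode => ([], mode)
  | (idx, c) :: rest, mode =>
    if c = '1' then solutionPass rest (1 - mode)
    else if idx % 2 = mode then
      let r := solutionPass rest mode
      (c :: r.1, r.2)
    else solutionPass rest mode

/-- A's fold equals the reference pass, provided the mode is a bit. -/
theorem foldl_step_eq_pass (l : List (Int × Char)) :
    ∀ (s : List Char) (mode : Int), (mode = 0 ∨ mode = 1) →
      l.foldl solutionStep (s, mode) = (s ++ (solutionPass l mode).1, (solutionPass l mode).2) := by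
  induction l with
  | nil => intro s mode _; simp [solutionPass]
  | cons p rest ih =>
    intro s mode hm
    obtain ⟨idx, c⟩ := p
    simp only [List.foldl_cons, solutionStep, solutionPass]
    split_ifs <;>
      first
        | omega
        | (rw [ih _ _ (by omega)]; try simp)

/-- The reference pass ends in mode (initial mode + number of '1' entries) mod 2. -/
theorem pass_final_mode (l : List (Int × Char)) :
    ∀ (mode : Int), (mode = 0 ∨ mode = 1) →
      (solutionPass l mode).2 = (mode + (l.countP (fun p => p.2 == '1') : Int)) % 2 := by
  induction l with
  | nil => intro mode hm; simp [solutionPass]; omega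
  | cons p rest ih =>
    intro mode hm
    obtain ⟨idx, c⟩ := p
    by_cases hc : c = '1'
    · have h := ih (1 - mode) (by omega)
      simp [solutionPass, hc, h]
      omega
    · by_cases hk : (idx % 2 = mode) <;>
        · have h := ih mode hm
          simp [solutionPass, hc, hk, h]

/-- B's fold equals two reference passes run on parities (pre % 2) and ((pre + ones) % 2). -/
theorem foldl_bstep_eq_pass (ones : Int) (l : List (Int × Char)) :
    ∀ (pre : Int) (p1 p2 : List Char),
      l.foldl (solutionBStep ones) (pre, p1, p2) =
        (pre + (l.countP (fun p => p.2 == '1') : Int),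
         p1 ++ (solutionPass l (pre % 2)).1,
         p2 ++ (solutionPass l ((pre + ones) % 2)).1) := by
  induction l with
  | nil => intro pre p1 p2; simp [solutionPass]
  | cons p rest ih =>
    intro pre p1 p2
    obtain ⟨idx, c⟩ := p
    by_cases hc : c = '1'
    · have e1 : (1 - pre % 2) = (pre + 1) % 2 := by omega
      have e2 : (1 - (pre + ones) % 2) = (pre + 1 + ones) % 2 := by omega
      subst hc
      simp [List.foldl_cons, solutionBStep, solutionPass, ih, e1, e2]
      omega
    · have h1 : (idx % 2 = pre % 2) ↔ ((pre + idx) % 2 = 0) := by omega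
      have h2 : (idx % 2 = (pre + ones) % 2) ↔ (((pre + idx) % 2 + ones) % 2 = 0) := by omega
      simp only [List.foldl_cons, solutionBStep, solutionPass, h1, h2, List.countP_cons, ih]
      split_ifs <;> simp_all

/-- The '1'-count over the enumerated list equals the '1'-count over the characters. -/
theorem countP_enumerate_eq (xs : List Char) :
    ∀ (s : Int), ((PySem.List.enumerate xs s).countP (fun p => p.2 == '1')) = xs.count '1' := by
  induction xs with
  | nil => intro s; simp [PySem.List.enumerate_nil]
  | cons x rest ih =>
    intro s
    simp [PySem.List.enumerate_cons, List.countP_cons, ih, List.count_cons]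

-- ===== VERDICT (by name: the statement is the Claim_ definition above) =====
theorem solution_spec : Claim_equal_solution := by
  intro code _
  unfold Spec_solution solution solution_alt
  set l := PySem.List.enumerate code.toList with hl
  have hones : code.toList.foldl (fun acc ch => if ch == '1' then acc + 1 else acc) 0
      = (code.toList.count '1' : Int) := by
    simpa using PySem.List.foldl_beq_add_one (l := code.toList) (v := '1') (a := 0)
  have hcnt : (l.countP (fun p => p.2 == '1') : Int) = (code.toList.count '1' : Int) := by
    rw [hl, countP_enumerate_eq]
  have h0 : ((0 : Int) = 0 ∨ (0 : Int) = 1) := Or.inl rfl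
  have hm := pass_final_mode l 0 h0
  have hbit : ((solutionPass l 0).2 = 0 ∨ (solutionPass l 0).2 = 1) := by rw [hm]; omega
  have hA1 := foldl_step_eq_pass l [] 0 h0
  have hA2 := foldl_step_eq_pass l (solutionPass l 0).1 (solutionPass l 0).2 hbit
  have hB := foldl_bstep_eq_pass (code.toList.count '1' : Int) l 0 [] []
  have hmode : ((0 : Int) + (code.toList.count '1' : Int)) % 2 = (solutionPass l 0).2 := by
    rw [hm, hcnt]
  simp only [hones, hB, hmode, List.nil_append]
  simp only [hA1, List.nil_append] at *
  rw [hA2]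
  norm_num
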